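-- pv_equiv track=rewrite | github.com/krzyLadda/snnLearning | graphs.py | find_connections_to_break_in_cycles
-- ===== SOURCE A (Python) =====
-- def dfs_recursive(node, visited, stack, connections, connToBreak):
--     # Mark current node as visited and
--     # adds to recursion stack
--     visited[node] = True
--     stack[node] = True
--     # Recur for all postSyn nodes
--     for preSyn, postSyn in [(preSyn, postSyn) for (preSyn, postSyn) in connections
--                             if preSyn == node]:
--         if visited[postSyn] is False:
--             dfs_recursive(postSyn, visited, stack, connections, connToBreak)
--         elif stack[postSyn] is True:
--             connToBreak.add((preSyn, postSyn))
--     stack[node] = False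
--
-- def find_connections_to_break_in_cycles(inputs, outputsAndHidden, connections):
--     """to jest algorytm DFS
--     szuka wszysktich możliwych pętli i zwraca połaczenie które należy rozerwać
--
--     params: nodes - nodes that is all hidden and outputs, whitout inputs,
--     connections - direct connections"""
--     connToBreak = set()
--     visited = dict.fromkeys(inputs+outputsAndHidden, False)
--     stack = dict.fromkeys(inputs+outputsAndHidden, False)
--     # zacznij w każdym z nodów
--     for startNode in inputs+outputsAndHidden:
--         if visited[startNode] is False:
--             dfs_recursive(startNode, visited, stack, connections, connToBreak)
--     return connToBreak
-- ===== SOURCE B (Python) =====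
-- def find_connections_to_break_in_cycles(inputs, outputsAndHidden, connections):
--     """Adjacency dict + DFS that threads the current path as a recursion argument
--     (no stack dict, no per-call rescan of connections)."""
--     adj = {}
--     for pre, post in connections:
--         adj.setdefault(pre, []).append(post)
--     visited = set()
--     back = set()
--
--     def dfs(node, ancestors):
--         visited.add(node)
--         path = ancestors + [node]
--         for post in adj.get(node, []):
--             if post not in visited:
--                 dfs(post, path)
--             elif post in path:
--                 back.add((node, post))
--
--     for n in inputs + outputsAndHidden:
--         if n not in visited:
--             dfs(n, [])
--     return back
-- ===== Notes on version B (the rewrite author's own statement) =====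
-- stated objective: faster
-- what changed: B builds an adjacency dict once and runs a DFS that passes the current path as a recursion argument (visited as a set, no stack dict to mark/unmark), instead of A's DFS that rescans the whole connections list with a filtering comprehension on every call and maintains pre-filled visited/stack boolean dicts.
import Mathlib
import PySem

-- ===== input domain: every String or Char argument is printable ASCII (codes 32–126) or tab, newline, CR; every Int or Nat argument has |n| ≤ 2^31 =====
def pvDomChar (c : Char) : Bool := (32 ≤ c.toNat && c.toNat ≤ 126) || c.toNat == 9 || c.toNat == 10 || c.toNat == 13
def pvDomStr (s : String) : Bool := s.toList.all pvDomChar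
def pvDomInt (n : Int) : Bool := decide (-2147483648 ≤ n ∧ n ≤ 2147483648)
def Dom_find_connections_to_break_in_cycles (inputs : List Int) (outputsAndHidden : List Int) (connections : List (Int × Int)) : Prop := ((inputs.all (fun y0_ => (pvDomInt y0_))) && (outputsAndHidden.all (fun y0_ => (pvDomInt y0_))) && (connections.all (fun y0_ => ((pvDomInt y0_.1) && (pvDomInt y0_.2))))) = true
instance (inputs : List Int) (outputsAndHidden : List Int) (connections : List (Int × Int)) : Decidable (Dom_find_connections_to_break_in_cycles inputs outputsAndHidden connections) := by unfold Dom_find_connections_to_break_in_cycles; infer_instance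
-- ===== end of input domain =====

-- ===== PORT A =====
-- B replaces A's per-call rescan of the connections list and its stack dict by an
-- adjacency dict built once and a DFS passing the current path as an argument.
-- Both ports return the back-edge set as a list in first-insertion order (Python
-- returns a set; set comparison ignores order).

-- DFS state of A: (visited, stack, connToBreak).  Fuel bounds the recursion depth; with
-- fuel = (inputs+outputsAndHidden).length + 1 it never runs out on inputs satisfying Pre_
-- (each nested call targets a distinct not-yet-visited node, all among the dict keys).
def pvDfsA (connections : List (Int × Int)) :
    Nat → Int → PySem.Dict Int Bool × PySem.Dict Int Bool × PySem.Set (Int × Int) →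
    PySem.Dict Int Bool × PySem.Dict Int Bool × PySem.Set (Int × Int)
  | 0, _, st => st
  | fuel + 1, node, (visited, stack, ctb) =>
    let visited := visited.insert node true
    let stack := stack.insert node true
    -- for preSyn, postSyn in [(p, q) for (p, q) in connections if p == node]:
    -- `visited[postSyn]` / `stack[postSyn]` are ported with getD (exact under Pre_: the key is present)
    let st := (connections.filter (fun p => p.1 == node)).foldl
      (fun st p =>
        if st.1.getD p.2 false = false then
          pvDfsA connections fuel p.2 st
        else if st.2.1.getD p.2 false = true then
          (st.1, st.2.1, PySem.Set.add st.2.2 p)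
        else st) (visited, stack, ctb)
    (st.1, st.2.1.insert node false, st.2.2)

def find_connections_to_break_in_cycles (inputs : List Int) (outputsAndHidden : List Int) (connections : List (Int × Int)) : List (Int × Int) :=
  let nodes := inputs ++ outputsAndHidden
  -- dict.fromkeys(nodes, False): insert False for each key in order (overwrite keeps position)
  let visited := nodes.foldl (fun d k => d.insert k false) PySem.Dict.empty
  let stack := nodes.foldl (fun d k => d.insert k false) PySem.Dict.empty
  let st := nodes.foldl
    (fun st n => if st.1.getD n false = false then pvDfsA connections (nodes.length + 1) n st else st)
    (visited, stack, PySem.Set.empty)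
  st.2.2

-- ===== PORT B =====
-- DFS state of B: (visited set, back-edge set); the current path travels as the
-- `ancestors` argument (same fuel scheme as A: the two recursions have the same tree).
def pvDfsB (adj : PySem.Dict Int (List Int)) :
    Nat → Int → List Int → PySem.Set Int × PySem.Set (Int × Int) →
    PySem.Set Int × PySem.Set (Int × Int)
  | 0, _, _, st => st
  | fuel + 1, node, ancestors, (vis, back) =>
    let vis := PySem.Set.add vis node
    let path := ancestors ++ [node]
    -- for post in adj.get(node, []):
    (adj.getD node []).foldl
      (fun st q =>
        if st.1.contains q = false then
          pvDfsB adj fuel q path st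
        else if q ∈ path then
          (st.1, PySem.Set.add st.2 (node, q))
        else st) (vis, back)

def find_connections_to_break_in_cycles_alt (inputs : List Int) (outputsAndHidden : List Int) (connections : List (Int × Int)) : List (Int × Int) :=
  -- adj.setdefault(pre, []).append(post)  ==  adj[pre] = adj.get(pre, []) + [post]
  let adj := connections.foldl (fun d p => d.modify p.1 [] (· ++ [p.2])) PySem.Dict.empty
  let nodes := inputs ++ outputsAndHidden
  let st := nodes.foldl
    (fun st n => if st.1.contains n = false then pvDfsB adj (nodes.length + 1) n [] st else st)
    (PySem.Set.empty, PySem.Set.empty)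
  st.2

-- ===== PRECONDITION & SPEC =====
-- Pre_ excludes exactly the inputs on which A raises KeyError: a connection whose source is a
-- listed node but whose target is not (visited[postSyn] is looked up for such a target).
def Pre_find_connections_to_break_in_cycles (inputs : List Int) (outputsAndHidden : List Int) (connections : List (Int × Int)) : Prop :=
  ∀ p ∈ connections, p.1 ∈ inputs ++ outputsAndHidden → p.2 ∈ inputs ++ outputsAndHidden
instance (inputs : List Int) (outputsAndHidden : List Int) (connections : List (Int × Int)) : Decidable (Pre_find_connections_to_break_in_cycles inputs outputsAndHidden connections) := by unfold Pre_find_connections_to_break_in_cycles; infer_instance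

def pvWitness_find_connections_to_break_in_cycles : List Int × List Int × (List (Int × Int)) :=
  ([1], [2, 3], [(1, 2), (2, 3), (3, 2)])

def Spec_find_connections_to_break_in_cycles (inputs : List Int) (outputsAndHidden : List Int) (connections : List (Int × Int)) (out : List (Int × Int)) : Prop := out = find_connections_to_break_in_cycles_alt inputs outputsAndHidden connections
instance (inputs : List Int) (outputsAndHidden : List Int) (connections : List (Int × Int)) (out : List (Int × Int)) : Decidable (Spec_find_connections_to_break_in_cycles inputs outputsAndHidden connections out) := by unfold Spec_find_connections_to_break_in_cycles; infer_instance

-- ===== CLAIM (what is proved, stated in full; the proofs are below) =====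
def Claim_equal_find_connections_to_break_in_cycles : Prop := ∀ (inputs : List Int) (outputsAndHidden : List Int) (connections : List (Int × Int)), Dom_find_connections_to_break_in_cycles inputs outputsAndHidden connections → Pre_find_connections_to_break_in_cycles inputs outputsAndHidden connections → Spec_find_connections_to_break_in_cycles inputs outputsAndHidden connections (find_connections_to_break_in_cycles inputs outputsAndHidden connections)

-- ===== LEMMAS AND PROOFS =====

-- The adjacency dict built by B lists exactly the targets of node's outgoing connections, in order.
lemma pvAdj_getD (connections : List (Int × Int)) (node : Int) :
    (connections.foldl (fun d p => d.modify p.1 [] (· ++ [p.2])) PySem.Dict.empty).getD node []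
      = (connections.filter (fun p => p.1 == node)).map (·.2) := by
  simpa using PySem.Dict.getD_foldl_modify_append (l := connections) (d := PySem.Dict.empty) (c := node)

-- Relation between an A-state and a B-state at recursion-stack `path`: A's visited dict answers
-- membership in B's visited set, A's stack dict answers membership in `path`, same back edges.
def pvRel (path : List Int) (a : PySem.Dict Int Bool × PySem.Dict Int Bool × PySem.Set (Int × Int))
    (b : PySem.Set Int × PySem.Set (Int × Int)) : Prop :=
  (∀ k, a.1.getD k false = b.1.contains k) ∧
  (∀ k, a.2.1.getD k false = decide (k ∈ path)) ∧
  a.2.2 = b.2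

lemma pvSet_contains_add (s : PySem.Set Int) (x k : Int) :
    (PySem.Set.add s x).contains k = (s.contains k || decide (k = x)) := by
  by_cases h1 : k ∈ s
  · have hm : k ∈ PySem.Set.add s x := (PySem.Set.mem_add s x k).2 (Or.inl h1)
    simp [PySem.Set.contains_eq_listContains, h1, hm]
  · by_cases h2 : k = x
    · have hm : k ∈ PySem.Set.add s x := (PySem.Set.mem_add s x k).2 (Or.inr h2)
      simp [PySem.Set.contains_eq_listContains, h2]
    · have hm : k ∉ PySem.Set.add s x := fun h => ((PySem.Set.mem_add s x k).1 h).elim h1 h2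
      simp [PySem.Set.contains_eq_listContains, h1, h2, hm]

-- Main simulation: A's dfs from `node` with recursion stack = `ancestors` corresponds to
-- B's dfs from `node` with the same fuel; A's stack dict is restored on exit, B's visited
-- set only grows.
lemma pvDfs_rel (connections : List (Int × Int)) :
    ∀ fuel node ancestors stA stB, pvRel ancestors stA stB →
      (∀ k ∈ ancestors, stB.1.contains k = true) →
      stB.1.contains node = false →
      pvRel ancestors (pvDfsA connections fuel node stA)
        (pvDfsB (connections.foldl (fun d p => d.modify p.1 [] (· ++ [p.2])) PySem.Dict.empty) fuel node ancestors stB) ∧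
      (∀ k, stB.1.contains k = true →
        (pvDfsB (connections.foldl (fun d p => d.modify p.1 [] (· ++ [p.2])) PySem.Dict.empty) fuel node ancestors stB).1.contains k = true) := by
  intro fuel
  induction fuel with
  | zero =>
    intro node ancestors stA stB h _ _
    exact ⟨by simpa [pvDfsA, pvDfsB] using h, by intro k hk; simpa [pvDfsB] using hk⟩
  | succ fuel ih =>
    intro node ancestors stA stB h hanc hnode
    obtain ⟨stA1, stA2, stA3⟩ := stA
    obtain ⟨stB1, stB2⟩ := stB
    obtain ⟨hv, hs, hc⟩ := h
    have hnotmemanc : node ∉ ancestors := by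
      intro hmem
      have h2 := hanc node hmem
      rw [h2] at hnode
      exact absurd hnode (by decide)
    simp only [pvDfsA, pvDfsB, pvAdj_getD]
    have hfilter : ∀ p ∈ connections.filter (fun p => p.1 == node), p.1 = node := by
      intro p hp
      have := List.of_mem_filter hp
      simpa using this
    -- generalized loop invariant, path := ancestors ++ [node]
    have loop : ∀ (l : List (Int × Int)), (∀ p ∈ l, p.1 = node) →
        ∀ stA stB, pvRel (ancestors ++ [node]) stA stB →
        (∀ k ∈ ancestors ++ [node], stB.1.contains k = true) →
        pvRel (ancestors ++ [node])
          (l.foldl (fun st p =>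
              if st.1.getD p.2 false = false then pvDfsA connections fuel p.2 st
              else if st.2.1.getD p.2 false = true then (st.1, st.2.1, PySem.Set.add st.2.2 p)
              else st) stA)
          ((l.map (·.2)).foldl (fun st q =>
              if st.1.contains q = false then pvDfsB (connections.foldl (fun d p => d.modify p.1 [] (· ++ [p.2])) PySem.Dict.empty) fuel q (ancestors ++ [node]) st
              else if q ∈ ancestors ++ [node] then (st.1, PySem.Set.add st.2 (node, q))
              else st) stB) ∧
        (∀ k, stB.1.contains k = true →
          ((l.map (·.2)).foldl (fun st q =>
              if st.1.contains q = false then pvDfsB (connections.foldl (fun d p => d.modify p.1 [] (· ++ [p.2])) PySem.Dict.empty) fuel q (ancestors ++ [node]) st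
              else if q ∈ ancestors ++ [node] then (st.1, PySem.Set.add st.2 (node, q))
              else st) stB).1.contains k = true) := by
      intro l
      induction l with
      | nil =>
        intro _ stA stB h _
        exact ⟨by simpa using h, by intro k hk; simpa using hk⟩
      | cons p rest ihl =>
        intro hmem stA stB h hpath
        obtain ⟨hv, hs, hc⟩ := h
        obtain ⟨p1, p2⟩ := p
        have hp1 : p1 = node := hmem (p1, p2) (List.mem_cons_self ..)
        simp only [List.map_cons, List.foldl_cons, hp1]
        rw [hv p2, hs p2]
        by_cases h1 : stB.1.contains p2 = false
        · rw [if_pos h1, if_pos h1]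
          have step := ih p2 (ancestors ++ [node]) stA stB ⟨hv, hs, hc⟩ hpath h1
          have hpath' : ∀ k ∈ ancestors ++ [node],
              (pvDfsB (connections.foldl (fun d p => d.modify p.1 [] (· ++ [p.2])) PySem.Dict.empty) fuel p2 (ancestors ++ [node]) stB).1.contains k = true :=
            fun k hk => step.2 k (hpath k hk)
          have next := ihl (fun q hq => hmem q (List.mem_cons_of_mem _ hq)) _ _ step.1 hpath'
          exact ⟨next.1, fun k hk => next.2 k (step.2 k hk)⟩
        · rw [if_neg h1, if_neg h1]
          by_cases h2 : p2 ∈ ancestors ++ [node]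
          · rw [if_pos (by simp [h2]), if_pos h2]
            exact ihl (fun q hq => hmem q (List.mem_cons_of_mem _ hq)) _ _
              ⟨hv, hs, by rw [hc]⟩ hpath
          · rw [if_neg (by simp [h2]), if_neg h2]
            exact ihl (fun q hq => hmem q (List.mem_cons_of_mem _ hq)) _ _ ⟨hv, hs, hc⟩ hpath
    -- relation at loop entry
    have hrel0 : pvRel (ancestors ++ [node]) (stA1.insert node true, stA2.insert node true, stA3)
        (PySem.Set.add stB1 node, stB2) := by
      refine ⟨?_, ?_, hc⟩
      · intro k
        rw [pvSet_contains_add]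
        by_cases hk : k = node
        · simp [hk]
        · simp [PySem.Dict.getD_insert, hk, hv k]
      · intro k
        by_cases hk : k = node
        · simp [hk]
        · simp [PySem.Dict.getD_insert, hk, hs k]
    have hpath0 : ∀ k ∈ ancestors ++ [node], (PySem.Set.add stB1 node).contains k = true := by
      intro k hk
      rw [pvSet_contains_add]
      rcases List.mem_append.1 hk with hk' | hk'
      · rw [hanc k hk']
        simp
      · rw [List.mem_singleton.1 hk']
        simp
    obtain ⟨⟨hv', hs', hc'⟩, hmono⟩ := loop _ hfilter _ _ hrel0 hpath0
    refine ⟨⟨hv', ?_, hc'⟩, ?_⟩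
    · intro k
      by_cases hk : k = node
      · simp [hk, hnotmemanc]
      · have := hs' k
        simp only [PySem.Dict.getD_insert, if_neg hk]
        rw [this]
        simp [List.mem_append, hk]
    · intro k hk
      apply hmono
      rw [pvSet_contains_add, hk]
      simp

-- dict.fromkeys(nodes, False) answers False (with default False) on every key.
lemma pvFromFalse_getD (l : List Int) :
    ∀ (d : PySem.Dict Int Bool), (∀ k, d.getD k false = false) →
      ∀ k, (l.foldl (fun d k => d.insert k false) d).getD k false = false := by
  induction l with
  | nil => intro d hd k; simpa using hd k
  | cons x rest ih =>
    intro d hd k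
    simp only [List.foldl_cons]
    apply ih
    intro k'
    simp [PySem.Dict.getD_insert, hd k']

-- ===== VERDICT (by name: the statement is the Claim_ definition above) =====
theorem find_connections_to_break_in_cycles_spec : Claim_equal_find_connections_to_break_in_cycles := by
  intro inputs outputsAndHidden connections _ _
  unfold Spec_find_connections_to_break_in_cycles
  unfold find_connections_to_break_in_cycles find_connections_to_break_in_cycles_alt
  have hv0 : ∀ k, ((inputs ++ outputsAndHidden).foldl (fun d k => d.insert k false) PySem.Dict.empty).getD k false = false :=
    pvFromFalse_getD _ PySem.Dict.empty (by simp [PySem.Dict.getD_empty])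
  have loop : ∀ (l : List Int) stA stB, pvRel [] stA stB →
      pvRel [] (l.foldl (fun st n => if st.1.getD n false = false then pvDfsA connections ((inputs ++ outputsAndHidden).length + 1) n st else st) stA)
        (l.foldl (fun st n => if st.1.contains n = false then pvDfsB (connections.foldl (fun d p => d.modify p.1 [] (· ++ [p.2])) PySem.Dict.empty) ((inputs ++ outputsAndHidden).length + 1) n [] st else st) stB) := by
    intro l
    induction l with
    | nil => intro stA stB h; simpa using h
    | cons n rest ihl =>
      intro stA stB h
      obtain ⟨hv, hs, hc⟩ := h
      simp only [List.foldl_cons]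
      apply ihl
      rw [hv n]
      by_cases h1 : stB.1.contains n = false
      · rw [if_pos h1, if_pos h1]
        exact (pvDfs_rel connections _ n [] stA stB ⟨hv, hs, hc⟩ (by simp) h1).1
      · rw [if_neg h1, if_neg h1]
        exact ⟨hv, hs, hc⟩
  have h := loop (inputs ++ outputsAndHidden)
      (((inputs ++ outputsAndHidden).foldl (fun d k => d.insert k false) PySem.Dict.empty),
       ((inputs ++ outputsAndHidden).foldl (fun d k => d.insert k false) PySem.Dict.empty),
       PySem.Set.empty)
      (PySem.Set.empty, PySem.Set.empty)
      ⟨by intro k; simp only []; rw [hv0 k]; simp [PySem.Set.contains_eq_listContains],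
       by intro k; simp only []; rw [hv0 k]; simp,
       rfl⟩
  exact h.2.2
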